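-- pv_equiv track=rewrite | github.com/Drills-hub/codes | 프로그래머스/1/138477. 명예의 전당 （1）/명예의 전당 （1）.py | solution
-- ===== SOURCE A (Python) =====
-- def solution(k, score):
--     rlt = []
--     k_list=[]
--     for i in score:
--         #k보다 작을 경우
--         if len(k_list) < k:
--             k_list.append(i)
--             rlt.append(min(k_list))
--         #k보다 클 경우
--         else:
--             k_list.append(i)
--             k_list.sort(reverse=1)
--             rlt.append(k_list[k-1])
--
--
--     return rlt
-- ===== SOURCE B (Python) =====
-- def solution(k, score):
--     # Maintain only the current hall of fame: a descending list of at most k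
--     # scores. Binary-search each day's score to its position, insert it, drop
--     # the smallest when the hall exceeds k, and report the last (lowest) entry.
--     out = []
--     top = []  # hall of fame scores, descending, len(top) <= k
--     for s in score:
--         lo, hi = 0, len(top)
--         while lo < hi:
--             mid = (lo + hi) // 2
--             if s <= top[mid]:
--                 lo = mid + 1
--             else:
--                 hi = mid
--         top.insert(lo, s)
--         if len(top) > k:
--             top.pop()
--         out.append(top[-1])
--     return out
-- ===== Notes on version B (the rewrite author's own statement) =====
-- stated objective: faster
-- what changed: B keeps only the current hall of fame as a descending list of at most k scores, updated by one ordered insert plus a pop per day, instead of A's appending every score forever and re-sorting the whole history each day.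
-- outside the precondition, e.g. on solution(0, [5]): A returns [5], B raises IndexError
import Mathlib
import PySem

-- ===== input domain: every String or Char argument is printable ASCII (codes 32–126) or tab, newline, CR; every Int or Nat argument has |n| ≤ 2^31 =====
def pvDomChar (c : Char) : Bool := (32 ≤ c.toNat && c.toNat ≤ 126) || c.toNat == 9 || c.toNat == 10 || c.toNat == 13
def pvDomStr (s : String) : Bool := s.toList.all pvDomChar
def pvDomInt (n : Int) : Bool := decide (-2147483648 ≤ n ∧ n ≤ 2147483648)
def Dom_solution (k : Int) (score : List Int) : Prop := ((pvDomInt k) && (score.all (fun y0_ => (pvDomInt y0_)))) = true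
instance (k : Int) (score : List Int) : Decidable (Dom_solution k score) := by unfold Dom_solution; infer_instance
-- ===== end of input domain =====

-- B replaces A's "append everything and re-sort the whole history each day" by a hall-of-fame
-- list of at most k scores kept in descending order (one ordered insert + pop per day).

-- ===== PORT A =====
-- one day of A's loop: append i to k_list; while len < k report min, else sort descending and report k_list[k-1]
def stepA (k : Int) (st : List Int × List Int) (i : Int) : List Int × List Int :=
  if (st.2.length : Int) < k then
    let kl' := st.2 ++ [i]
    -- min(k_list): k_list is nonempty here, so Python's min never raises and the .getD 0 never fires
    (st.1 ++ [(PySem.List.min? kl' (fun x => x)).getD 0], kl')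
  else
    let kl' := PySem.List.sorted (st.2 ++ [i]) (fun x => x) true
    -- k_list[k-1]: in range whenever 1 ≤ k (Pre_); the .getD 0 never fires under Pre_
    (st.1 ++ [(PySem.List.pyGet? kl' (k - 1)).getD 0], kl')

def solution (k : Int) (score : List Int) : List Int :=
  (score.foldl (stepA k) ([], [])).1

-- ===== PORT B =====
-- the while-loop of Source B: binary search for the insertion position in the descending list
-- (top[mid] is always in range since hi ≤ len(top) throughout, so the .getD 0 never fires)
def bsLoop (s : Int) (top : List Int) (lo hi : Nat) : Nat :=
  if _h : lo < hi then
    let mid := (lo + hi) / 2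
    if s ≤ (PySem.List.pyGet? top (mid : Int)).getD 0 then bsLoop s top (mid + 1) hi
    else bsLoop s top lo mid
  else lo
termination_by hi - lo
decreasing_by all_goals omega

-- one day of B's loop: binary-search insert, pop the smallest if the hall exceeds k, report top[-1]
def stepB (k : Int) (st : List Int × List Int) (s : Int) : List Int × List Int :=
  let pos := bsLoop s st.2 0 st.2.length
  let top1 := PySem.List.insert st.2 (pos : Int) s
  let top2 := if k < (top1.length : Int) then top1.dropLast else top1
  -- top[-1]: top is nonempty under Pre_, so the .getD 0 never fires
  (st.1 ++ [(PySem.List.pyGet? top2 (-1)).getD 0], top2)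

def solution_alt (k : Int) (score : List Int) : List Int :=
  (score.foldl (stepB k) ([], [])).1

-- ===== PRECONDITION & SPEC =====
-- Pre_ excludes k ≤ 0 with a nonempty score: there A raises IndexError for k < 0, and for k = 0 its
-- value (a running minimum) is an accident of Python's negative-index wraparound (k_list[-1]),
-- where B's size-0 hall of fame is empty and B itself raises IndexError.
def Pre_solution (k : Int) (score : List Int) : Prop := 1 ≤ k ∨ score = []
instance (k : Int) (score : List Int) : Decidable (Pre_solution k score) := by
  unfold Pre_solution; infer_instance

def pvWitness_solution : Int × List Int := (3, [10, 100, 20, 150, 1, 100, 200])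

def Spec_solution (k : Int) (score : List Int) (out : List Int) : Prop := out = solution_alt k score
instance (k : Int) (score : List Int) (out : List Int) : Decidable (Spec_solution k score out) := by
  unfold Spec_solution; infer_instance

-- ===== CLAIM (what is proved, stated in full; the proofs are below) =====
def Claim_equal_solution : Prop := ∀ (k : Int) (score : List Int),
  Dom_solution k score → Pre_solution k score → Spec_solution k score (solution k score)

-- ===== LEMMAS AND PROOFS =====

-- proof-side ordered insert into a descending list (what B's binary-search insert amounts to)
def insertDesc (s : Int) : List Int → List Int
  | [] => [s]
  | t :: ts => if s ≤ t then t :: insertDesc s ts else s :: t :: ts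

-- the binary search narrows [lo, hi) keeping "everything before lo is ≥ s, everything from hi on is < s"
lemma bsLoop_spec (s : Int) (top : List Int)
    (hp : top.Pairwise (fun a b => b ≤ a)) :
    ∀ (lo hi : Nat), lo ≤ hi → hi ≤ top.length →
      (∀ (j : Nat) (hj : j < top.length), j < lo → s ≤ top[j]) →
      (∀ (j : Nat) (hj : j < top.length), hi ≤ j → top[j] < s) →
      bsLoop s top lo hi ≤ top.length ∧
      (∀ (j : Nat) (hj : j < top.length), j < bsLoop s top lo hi → s ≤ top[j]) ∧
      (∀ (j : Nat) (hj : j < top.length), bsLoop s top lo hi ≤ j → top[j] < s) := by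
  intro lo hi
  induction lo, hi using bsLoop.induct s top with
  | case1 lo hi h mid hle ih =>
      intro _hlh hhi hbefore hafter
      have hmid : mid < top.length := by omega
      have hget : (PySem.List.pyGet? top ((mid : Nat) : Int)).getD 0 = top[mid] := by
        rw [PySem.List.pyGet?_natCast, List.getElem?_eq_getElem hmid, Option.getD_some]
      have hmono := List.pairwise_iff_getElem.1 hp
      rw [bsLoop, dif_pos h, if_pos hle]
      rw [hget] at hle
      exact ih (by omega) hhi
        (fun j hj hjlt => le_trans hle
          (by rcases Nat.lt_succ_iff_lt_or_eq.1 hjlt with hlt | rfl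
              · exact hmono j mid hj hmid hlt
              · exact le_refl _))
        hafter
  | case2 lo hi h mid hgt ih =>
      intro _hlh hhi hbefore hafter
      have hmid : mid < top.length := by omega
      have hget : (PySem.List.pyGet? top ((mid : Nat) : Int)).getD 0 = top[mid] := by
        rw [PySem.List.pyGet?_natCast, List.getElem?_eq_getElem hmid, Option.getD_some]
      have hmono := List.pairwise_iff_getElem.1 hp
      rw [bsLoop, dif_pos h, if_neg hgt]
      rw [hget] at hgt
      have hgt' : top[mid] < s := not_le.1 hgt
      exact ih (by omega) (by omega) hbefore
        (fun j hj hjge => by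
          rcases Nat.lt_or_ge mid j with hlt | hge
          · exact lt_of_le_of_lt (hmono mid j hmid hj hlt) hgt'
          · have : j = mid := by omega
            subst this; exact hgt')
  | case3 lo hi h =>
      intro hlh hhi hbefore hafter
      rw [bsLoop, dif_neg h]
      exact ⟨by omega, fun j hj hjlt => hbefore j hj hjlt,
        fun j hj hjge => hafter j hj (by omega)⟩

-- inserting at a position r with "before r everything ≥ s, at r (if any) < s" is the ordered insert
lemma insert_at_eq_insertDesc (s : Int) :
    ∀ (top : List Int) (r : Nat), r ≤ top.length →
      (∀ (j : Nat) (hj : j < top.length), j < r → s ≤ top[j]) →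
      (∀ (hr : r < top.length), top[r] < s) →
      top.take r ++ s :: top.drop r = insertDesc s top := by
  intro top
  induction top with
  | nil =>
      intro r hr _ _
      have : r = 0 := by simpa using hr
      subst this
      simp [insertDesc]
  | cons t ts ih =>
      intro r hr hbefore hat
      cases r with
      | zero =>
          have hts : t < s := hat (by simp)
          simp [insertDesc, not_le.2 hts]
      | succ r =>
          have hst : s ≤ t := hbefore 0 (by simp) (by omega)
          rw [List.take_succ_cons, List.drop_succ_cons, List.cons_append,
            show insertDesc s (t :: ts) = t :: insertDesc s ts by simp [insertDesc, hst]]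
          exact congrArg (t :: ·)
            (ih r (by simpa using hr)
              (fun j hj hjlt => hbefore (j + 1) (by simpa using hj) (by omega))
              (fun hr' => hat (by simpa using hr')))

-- B's binary-search insert into a descending hall = the ordered insert
lemma insert_bsLoop_eq_insertDesc (s : Int) (top : List Int)
    (hp : top.Pairwise (fun a b => b ≤ a)) :
    PySem.List.insert top ((bsLoop s top 0 top.length : Nat) : Int) s = insertDesc s top := by
  obtain ⟨hle, hbefore, hat⟩ := bsLoop_spec s top hp 0 top.length (by omega) (le_refl _)
    (fun j hj hjlt => by omega) (fun j hj hjge => by omega)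
  rw [PySem.List.insert_natCast top _ s hle]
  exact insert_at_eq_insertDesc s top _ hle hbefore (fun hr => hat _ hr (le_refl _))

-- B's hand-written ordered insert is PySem's insertBy for the descending order
lemma insertDesc_eq_insertBy (s : Int) (l : List Int) :
    insertDesc s l = PySem.List.insertBy (fun a b => decide (b < a)) s l := by
  induction l with
  | nil => rfl
  | cons t ts ih =>
      by_cases h : s ≤ t
      · simp [insertDesc, PySem.List.insertBy, h, not_lt.2 h, ih]
      · simp [insertDesc, PySem.List.insertBy, h, not_le.1 h]

-- sorting the history with one more element = ordered insert into the sorted history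
lemma sortDesc_append (l : List Int) (s : Int) :
    PySem.List.sorted (l ++ [s]) (fun x => x) true
      = insertDesc s (PySem.List.sorted l (fun x => x) true) := by
  rw [PySem.List.sorted_rev_eq_foldl_insertBy, PySem.List.sorted_rev_eq_foldl_insertBy,
    List.foldl_append, insertDesc_eq_insertBy]
  rfl

lemma length_insertDesc (s : Int) (l : List Int) :
    (insertDesc s l).length = l.length + 1 := by
  induction l with
  | nil => rfl
  | cons t ts ih => by_cases h : s ≤ t <;> simp [insertDesc, h, ih]

lemma insertDesc_ne_nil (s : Int) (l : List Int) : insertDesc s l ≠ [] := by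
  cases l with
  | nil => simp [insertDesc]
  | cons t ts => by_cases h : s ≤ t <;> simp [insertDesc, h]

-- dropping the last element of one-longer-than-K is truncating to K
lemma dropLast_take_succ : ∀ (l : List Int) (K : Nat), K + 1 ≤ l.length →
    (l.take (K + 1)).dropLast = l.take K := by
  intro l
  induction l with
  | nil => intro K hK; simp at hK
  | cons t ts ih =>
      intro K hK
      cases K with
      | zero => simp
      | succ K =>
          rw [List.take_succ_cons, List.take_succ_cons,
            List.dropLast_cons_of_ne_nil (by
              cases ts with
              | nil => simp at hK
              | cons u us => simp),
            ih K (by simp only [List.length_cons] at hK; omega)]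

-- popping the overflow of an insert into the truncated list = truncating the insert into the full list
lemma dropLast_insertDesc_take (s : Int) :
    ∀ (S : List Int) (K : Nat), K ≤ S.length →
      (insertDesc s (S.take K)).dropLast = (insertDesc s S).take K := by
  intro S
  induction S with
  | nil =>
      intro K hK
      have : K = 0 := by simpa using hK
      subst this
      simp [insertDesc]
  | cons t ts ih =>
      intro K hK
      cases K with
      | zero => simp [insertDesc]
      | succ K =>
          rw [List.take_succ_cons]
          by_cases h : s ≤ t
          · rw [show insertDesc s (t :: ts.take K) = t :: insertDesc s (ts.take K) by
                simp [insertDesc, h],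
              show insertDesc s (t :: ts) = t :: insertDesc s ts by simp [insertDesc, h],
              List.dropLast_cons_of_ne_nil (insertDesc_ne_nil s (ts.take K)),
              ih K (by simpa using hK), List.take_succ_cons]
          · rw [show insertDesc s (t :: ts.take K) = s :: t :: ts.take K by
                simp [insertDesc, h],
              show insertDesc s (t :: ts) = s :: t :: ts by simp [insertDesc, h],
              List.dropLast_cons_of_ne_nil (by simp), List.take_succ_cons,
              show t :: ts.take K = (t :: ts).take (K + 1) from (List.take_succ_cons ..).symm,
              dropLast_take_succ (t :: ts) K (by simp only [List.length_cons] at hK ⊢; omega)]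

-- the last element of a pairwise-descending list is ≤ every element
lemma getLast?_desc_le {l : List Int} (hp : l.Pairwise (fun a b => b ≤ a)) {g : Int}
    (hg : l.getLast? = some g) : ∀ y ∈ l, g ≤ y := by
  induction l with
  | nil => simp at hg
  | cons t ts ih =>
      intro y hy
      cases ts with
      | nil =>
          simp at hg hy
          omega
      | cons u us =>
          rw [List.getLast?_cons_cons] at hg
          rcases List.mem_cons.1 hy with rfl | hy'
          · exact (List.pairwise_cons.1 hp).1 g (List.mem_of_getLast? hg)
          · exact ih (List.pairwise_cons.1 hp).2 hg y hy'

-- min(l) = last element of l sorted descending (nonempty l)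
lemma min?_eq_getLast?_sortDesc (l : List Int) (hl : l ≠ []) :
    PySem.List.min? l (fun x => x) = (PySem.List.sorted l (fun x => x) true).getLast? := by
  obtain ⟨m, hm⟩ : ∃ m, PySem.List.min? l (fun x => x) = some m := by
    rcases Option.eq_none_or_eq_some (PySem.List.min? l (fun x => x)) with h | h
    · exact absurd ((PySem.List.min?_eq_none_iff _ _).1 h) hl
    · exact h
  obtain ⟨g, hg⟩ : ∃ g, (PySem.List.sorted l (fun x => x) true).getLast? = some g :=
    Option.ne_none_iff_exists'.1 (by simp [List.getLast?_eq_none_iff, PySem.List.sorted_eq_nil_iff, hl])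
  rw [hm, hg]
  have hgl : g ∈ l := (PySem.List.mem_sorted _ _ _ _).1 (List.mem_of_getLast? hg)
  have hml : m ∈ PySem.List.sorted l (fun x => x) true :=
    (PySem.List.mem_sorted _ _ _ _).2 (PySem.List.min?_mem hm)
  have h1 : m ≤ g := PySem.List.min?_isMin hm g hgl
  have h2 : g ≤ m := getLast?_desc_le (PySem.List.sorted_pairwise_rev l _) hg m hml
  exact congrArg some (le_antisymm h1 h2)

-- the loop invariant: with the same output so far, B's hall of fame = take k of A's sorted history
lemma loop_eq (k : Int) (K : Nat) (hk : 1 ≤ k) (hK : (K : Int) = k) :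
    ∀ (rest kl out : List Int),
      (rest.foldl (stepA k) (out, kl)).1
        = (rest.foldl (stepB k) (out, (PySem.List.sorted kl (fun x => x) true).take K)).1 := by
  intro rest
  induction rest with
  | nil => intro kl out; rfl
  | cons i rest ih =>
      intro kl out
      have hlen : (PySem.List.sorted kl (fun x => x) true).length = kl.length :=
        PySem.List.length_sorted _ _ _
      have hins : PySem.List.sorted (kl ++ [i]) (fun x => x) true
          = insertDesc i (PySem.List.sorted kl (fun x => x) true) := sortDesc_append kl i
      have hlen' : (PySem.List.sorted (kl ++ [i]) (fun x => x) true).length = kl.length + 1 := by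
        rw [PySem.List.length_sorted]; simp
      simp only [List.foldl_cons]
      by_cases h : (kl.length : Int) < k
      · -- hall not full yet: A reports min, B's hall is the whole sorted history
        have hkl : kl.length < K := by omega
        have htake : (PySem.List.sorted kl (fun x => x) true).take K
            = PySem.List.sorted kl (fun x => x) true :=
          List.take_of_length_le (by omega)
        have hA : stepA k (out, kl) i
            = (out ++ [(PySem.List.min? (kl ++ [i]) (fun x => x)).getD 0], kl ++ [i]) := by
          simp only [stepA]
          rw [if_pos h]
        have hnot : ¬ k < ((insertDesc i (PySem.List.sorted kl (fun x => x) true)).length : Int) := by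
          rw [length_insertDesc]
          omega
        have hB : stepB k (out, (PySem.List.sorted kl (fun x => x) true).take K) i
            = (out ++ [(PySem.List.pyGet? (PySem.List.sorted (kl ++ [i]) (fun x => x) true) (-1)).getD 0],
               PySem.List.sorted (kl ++ [i]) (fun x => x) true) := by
          simp only [stepB]
          rw [htake, insert_bsLoop_eq_insertDesc i _ (PySem.List.sorted_pairwise_rev kl _),
            if_neg hnot, ← hins]
        rw [hA, hB]
        have hIH := ih (kl ++ [i])
          (out ++ [(PySem.List.min? (kl ++ [i]) (fun x => x)).getD 0])
        have htake' : (PySem.List.sorted (kl ++ [i]) (fun x => x) true).take K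
            = PySem.List.sorted (kl ++ [i]) (fun x => x) true :=
          List.take_of_length_le (by omega)
        rw [htake'] at hIH
        rw [hIH]
        congr 3
        rw [PySem.List.pyGet?_neg_one, min?_eq_getLast?_sortDesc (kl ++ [i]) (by simp)]
      · -- hall full: A sorts the whole history and reads index k-1, B pops the overflow
        have hkl : K ≤ kl.length := by omega
        have hA : stepA k (out, kl) i
            = (out ++ [(PySem.List.pyGet? (PySem.List.sorted (kl ++ [i]) (fun x => x) true) (k - 1)).getD 0],
               PySem.List.sorted (kl ++ [i]) (fun x => x) true) := by
          simp only [stepA]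
          rw [if_neg h]
        have hlen1 : (insertDesc i ((PySem.List.sorted kl (fun x => x) true).take K)).length = K + 1 := by
          rw [length_insertDesc, List.length_take]
          omega
        have hcond : k < ((insertDesc i ((PySem.List.sorted kl (fun x => x) true).take K)).length : Int) := by
          rw [hlen1]; omega
        have hdrop : (insertDesc i ((PySem.List.sorted kl (fun x => x) true).take K)).dropLast
            = (PySem.List.sorted (kl ++ [i]) (fun x => x) true).take K := by
          rw [dropLast_insertDesc_take i _ K (by omega), ← hins]
        have hB : stepB k (out, (PySem.List.sorted kl (fun x => x) true).take K) i
            = (out ++ [(PySem.List.pyGet? ((PySem.List.sorted (kl ++ [i]) (fun x => x) true).take K) (-1)).getD 0],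
               (PySem.List.sorted (kl ++ [i]) (fun x => x) true).take K) := by
          simp only [stepB]
          rw [insert_bsLoop_eq_insertDesc i _
              ((PySem.List.sorted_pairwise_rev kl (fun x => x)).sublist (List.take_sublist ..)),
            if_pos hcond, hdrop]
        rw [hA, hB]
        have hIH := ih (PySem.List.sorted (kl ++ [i]) (fun x => x) true)
          (out ++ [(PySem.List.pyGet? (PySem.List.sorted (kl ++ [i]) (fun x => x) true) (k - 1)).getD 0])
        rw [PySem.List.sorted_rev_sorted_rev] at hIH
        rw [hIH]
        congr 3
        -- both read the k-th highest: kl'[k-1] = last of the truncation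
        rw [PySem.List.pyGet?_neg_one]
        have hk1 : k - 1 = ((K - 1 : Nat) : Int) := by omega
        rw [hk1, PySem.List.pyGet?_natCast, List.getLast?_eq_getElem?, List.length_take,
          List.getElem?_take]
        have hmin : min K (PySem.List.sorted (kl ++ [i]) (fun x => x) true).length = K := by omega
        rw [hmin, if_pos (by omega)]

-- ===== VERDICT (by name: the statement is the Claim_ definition above) =====
theorem solution_spec : Claim_equal_solution := by
  intro k score _hdom hpre
  unfold Spec_solution
  rcases hpre with hk | rfl
  · have hK : ((k.toNat : Int)) = k := Int.toNat_of_nonneg (by omega)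
    have := loop_eq k k.toNat hk hK score [] []
    simpa [solution, solution_alt,
      show PySem.List.sorted ([] : List Int) (fun x => x) true = [] from rfl] using this
  · rfl
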